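-- pv_equiv track=rewrite | github.com/epilectrik/voynich | archive/scripts/AZC_constraint_hunting/prefix_grammar_role.py | decompose_token
-- ===== SOURCE A (Python) =====
-- from typing import Dict, List, Set, Tuple
--
-- KNOWN_PREFIXES = ['qo', 'ol', 'or', 'al', 'ar', 'ok', 'ot', 'ch', 'sh', 'ct', 'd', 's', 'y', 'o', 'a']
--
-- def decompose_token(token: str) -> Dict[str, str]:
--     """Decompose token into PREFIX, MIDDLE, SUFFIX."""
--     if not token or len(token) < 2:
--         return {'prefix': '', 'middle': token, 'suffix': '', 'original': token}
--
--     original = token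
--     prefix = ''
--
--     # Extract prefix (longest match first)
--     for p in sorted(KNOWN_PREFIXES, key=len, reverse=True):
--         if token.startswith(p):
--             prefix = p
--             break
--
--     return {'prefix': prefix, 'original': original}
-- ===== SOURCE B (Python) =====
-- KNOWN_PREFIXES = ['qo', 'ol', 'or', 'al', 'ar', 'ok', 'ot', 'ch', 'sh', 'ct', 'd', 's', 'y', 'o', 'a']
--
-- _TWO = frozenset(p for p in KNOWN_PREFIXES if len(p) == 2)
-- _ONE = frozenset(p for p in KNOWN_PREFIXES if len(p) == 1)
--
-- def decompose_token(token: str):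
--     """Decompose token into PREFIX, MIDDLE, SUFFIX."""
--     if not token or len(token) < 2:
--         return {'prefix': '', 'middle': token, 'suffix': '', 'original': token}
--     prefix = ''
--     if token[:2] in _TWO:
--         prefix = token[:2]
--     elif token[:1] in _ONE:
--         prefix = token[:1]
--     return {'prefix': prefix, 'original': token}
-- ===== Notes on version B (the rewrite author's own statement) =====
-- stated objective: idiomatic
-- what changed: Replaces the sort-then-scan over all 15 prefixes with two precomputed constant sets (length-2 and length-1 prefixes) and two direct slice lookups, longest first.
import Mathlib
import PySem

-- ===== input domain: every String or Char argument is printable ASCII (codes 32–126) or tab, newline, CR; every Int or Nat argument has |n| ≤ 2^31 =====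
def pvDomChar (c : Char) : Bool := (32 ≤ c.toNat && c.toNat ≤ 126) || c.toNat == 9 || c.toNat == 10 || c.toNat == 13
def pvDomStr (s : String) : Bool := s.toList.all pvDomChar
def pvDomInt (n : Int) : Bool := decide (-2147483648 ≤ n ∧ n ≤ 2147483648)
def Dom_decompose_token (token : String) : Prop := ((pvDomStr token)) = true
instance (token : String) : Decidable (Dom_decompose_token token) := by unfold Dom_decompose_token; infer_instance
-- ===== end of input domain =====

set_option maxHeartbeats 1000000


-- B replaces A's per-call sort-then-scan over all 15 prefixes with two precomputed
-- constant sets (the 2-char and 1-char prefixes) and two direct slice lookups, longest first (idiomatic).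

def KNOWN_PREFIXES : List String :=
  ["qo", "ol", "or", "al", "ar", "ok", "ot", "ch", "sh", "ct", "d", "s", "y", "o", "a"]

-- ===== PORT A =====
-- 'for p in sorted(…): if token.startswith(p): prefix = p; break' with prefix initialised to ''
def pvFirstPrefix (token : String) : List String → String
  | [] => ""
  | p :: ps => if PySem.Str.startswith token p then p else pvFirstPrefix token ps

def decompose_token (token : String) : List (String × String) :=
  if PySem.Str.len token < 2 then
    [("prefix", ""), ("middle", token), ("suffix", ""), ("original", token)]
  else
    let pre := pvFirstPrefix token
      (PySem.List.sorted KNOWN_PREFIXES (fun p => (PySem.Str.len p : Int)) true)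
    [("prefix", pre), ("original", token)]

-- ===== PORT B =====
def pvTwoSet : PySem.Set String :=
  PySem.Set.ofList (KNOWN_PREFIXES.filter (fun p => PySem.Str.len p == 2))
def pvOneSet : PySem.Set String :=
  PySem.Set.ofList (KNOWN_PREFIXES.filter (fun p => PySem.Str.len p == 1))

def decompose_token_alt (token : String) : List (String × String) :=
  if PySem.Str.len token < 2 then
    [("prefix", ""), ("middle", token), ("suffix", ""), ("original", token)]
  else
    let two := PySem.Str.slice token none (some 2)
    let one := PySem.Str.slice token none (some 1)
    let pre := if two ∈ pvTwoSet then two else if one ∈ pvOneSet then one else ""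
    [("prefix", pre), ("original", token)]

-- ===== PRECONDITION & SPEC =====
def Spec_decompose_token (token : String) (out : List (String × String)) : Prop := out = decompose_token_alt token
instance (token : String) (out : List (String × String)) : Decidable (Spec_decompose_token token out) := by unfold Spec_decompose_token; infer_instance

-- ===== CLAIM (what is proved, stated in full; the proofs are below) =====
def Claim_equal_decompose_token : Prop := ∀ (token : String), Dom_decompose_token token → Spec_decompose_token token (decompose_token token)

-- ===== LEMMAS AND PROOFS =====

-- the value of sorted(KNOWN_PREFIXES, key=len, reverse=True): stable, 2-char prefixes first
theorem sorted_prefixes_eq :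
    PySem.List.sorted KNOWN_PREFIXES (fun p => (PySem.Str.len p : Int)) true =
    ["qo", "ol", "or", "al", "ar", "ok", "ot", "ch", "sh", "ct", "d", "s", "y", "o", "a"] := by
  decide

theorem str_eq_iff (s t : String) : s = t ↔ s.toList = t.toList :=
  ⟨fun h => by rw [h], fun h => String.ext (by simpa using h)⟩

theorem sw2 (token p : String) (a b : Char) (rest : List Char) (h : token.toList = a :: b :: rest)
    (x y : Char) (hp : p.toList = [x, y]) :
    (PySem.Str.startswith token p = true) =
      (PySem.Str.slice token none (some 2) = p) := by
  have htwo : (PySem.Str.slice token none (some 2)).toList = [a, b] := by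
    simp [PySem.Str.toList_slice, PySem.List.slice_to, h]
  apply propext
  rw [str_eq_iff, htwo, hp, PySem.Str.startswith_eq, h]
  unfold PySem.Chars.startswith
  rw [hp]
  simp [List.isPrefixOf]
  constructor <;> rintro ⟨u, v⟩ <;> exact ⟨u.symm, v.symm⟩

theorem sw1 (token p : String) (a b : Char) (rest : List Char) (h : token.toList = a :: b :: rest)
    (x : Char) (hp : p.toList = [x]) :
    (PySem.Str.startswith token p = true) =
      (PySem.Str.slice token none (some 1) = p) := by
  have hone : (PySem.Str.slice token none (some 1)).toList = [a] := by
    simp [PySem.Str.toList_slice, PySem.List.slice_to, h]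
  apply propext
  rw [str_eq_iff, hone, hp, PySem.Str.startswith_eq, h]
  unfold PySem.Chars.startswith
  rw [hp]
  simp [List.isPrefixOf]
  exact ⟨fun u => u.symm, fun u => u.symm⟩

theorem main (token : String) (a b : Char) (rest : List Char) (h : token.toList = a :: b :: rest) :
    pvFirstPrefix token ["qo","ol","or","al","ar","ok","ot","ch","sh","ct","d","s","y","o","a"]
    = (let two := PySem.Str.slice token none (some 2)
       let one := PySem.Str.slice token none (some 1)
       if two ∈ pvTwoSet then two else if one ∈ pvOneSet then one else "") := by
  simp only [pvFirstPrefix,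
    sw2 token "qo" a b rest h 'q' 'o' rfl, sw2 token "ol" a b rest h 'o' 'l' rfl,
    sw2 token "or" a b rest h 'o' 'r' rfl, sw2 token "al" a b rest h 'a' 'l' rfl,
    sw2 token "ar" a b rest h 'a' 'r' rfl, sw2 token "ok" a b rest h 'o' 'k' rfl,
    sw2 token "ot" a b rest h 'o' 't' rfl, sw2 token "ch" a b rest h 'c' 'h' rfl,
    sw2 token "sh" a b rest h 's' 'h' rfl, sw2 token "ct" a b rest h 'c' 't' rfl,
    sw1 token "d" a b rest h 'd' rfl, sw1 token "s" a b rest h 's' rfl,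
    sw1 token "y" a b rest h 'y' rfl, sw1 token "o" a b rest h 'o' rfl,
    sw1 token "a" a b rest h 'a' rfl]
  set t2 := PySem.Str.slice token none (some 2) with ht2
  set t1 := PySem.Str.slice token none (some 1) with ht1
  show _ = (if t2 ∈ pvTwoSet then t2 else if t1 ∈ pvOneSet then t1 else "")
  have m2 : (t2 ∈ pvTwoSet) ↔ (t2 = "qo" ∨ t2 = "ol" ∨ t2 = "or" ∨ t2 = "al" ∨ t2 = "ar" ∨ t2 = "ok" ∨ t2 = "ot" ∨ t2 = "ch" ∨ t2 = "sh" ∨ t2 = "ct") := by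
    rw [show pvTwoSet = ["qo","ol","or","al","ar","ok","ot","ch","sh","ct"] from by decide]
    simp
  have m1 : (t1 ∈ pvOneSet) ↔ (t1 = "d" ∨ t1 = "s" ∨ t1 = "y" ∨ t1 = "o" ∨ t1 = "a") := by
    rw [show pvOneSet = ["d","s","y","o","a"] from by decide]
    simp
  by_cases h2 : t2 ∈ pvTwoSet
  · rw [if_pos h2]
    rcases m2.mp h2 with e|e|e|e|e|e|e|e|e|e <;> rw [e] <;> norm_num <;> decide
  · rw [if_neg h2]
    rw [m2] at h2
    push Not at h2
    obtain ⟨n1,n2,n3,n4,n5,n6,n7,n8,n9,n10⟩ := h2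
    simp only [if_neg n1, if_neg n2, if_neg n3, if_neg n4, if_neg n5, if_neg n6, if_neg n7,
      if_neg n8, if_neg n9, if_neg n10]
    by_cases h1 : t1 ∈ pvOneSet
    · rw [if_pos h1]
      rcases m1.mp h1 with e|e|e|e|e <;> rw [e] <;> norm_num <;> decide
    · rw [if_neg h1]
      rw [m1] at h1
      push Not at h1
      obtain ⟨k1,k2,k3,k4,k5⟩ := h1
      simp only [if_neg k1, if_neg k2, if_neg k3, if_neg k4, if_neg k5]

-- ===== VERDICT (by name: the statement is the Claim_ definition above) =====
theorem decompose_token_spec : Claim_equal_decompose_token := by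
  intro token _
  unfold Spec_decompose_token decompose_token decompose_token_alt
  by_cases hl : PySem.Str.len token < 2
  · rw [if_pos hl, if_pos hl]
  · rw [if_neg hl, if_neg hl]
    have hlen : 2 ≤ token.toList.length := by
      rw [PySem.Str.len_eq] at hl
      omega
    obtain ⟨a, b, rest, h⟩ : ∃ a b rest, token.toList = a :: b :: rest := by
      match htl : token.toList, hlen' : token.toList.length, hlen with
      | a :: b :: rest, _, _ => exact ⟨a, b, rest, rfl⟩
      | [], n, hn => rw [htl] at hlen; simp at hlen
      | [x], n, hn => rw [htl] at hlen; simp at hlen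
    rw [sorted_prefixes_eq, main token a b rest h]
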